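-- pv_equiv track=rewrite | github.com/yangDDDD/gpr_gy | src/utils/helper.py | bin_distance
-- ===== SOURCE A (Python) =====
-- def bin_distance(dist):
--     buckets = [-8, -4, -2, -1, 1, 2, 3, 4, 5, 8, 16, 32, 64]
--     low, high = 0, len(buckets)
--     while low < high:
--         mid = low + int((high - low) / 2)
--         if dist > buckets[mid]:
--             low = mid + 1
--         elif dist < buckets[mid]:
--             high = mid
--         else:
--             return mid
--
--     return low
-- ===== SOURCE B (Python) =====
-- def bin_distance(dist):
--     buckets = [-8, -4, -2, -1, 1, 2, 3, 4, 5, 8, 16, 32, 64]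
--     return sum(1 for b in buckets if dist > b)
-- ===== Notes on version B (the rewrite author's own statement) =====
-- stated objective: simpler
-- what changed: Replaced the binary-search loop with a single linear count of buckets strictly below dist (for the sorted distinct bucket list, the insertion point / match index equals that count).
import Mathlib
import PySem

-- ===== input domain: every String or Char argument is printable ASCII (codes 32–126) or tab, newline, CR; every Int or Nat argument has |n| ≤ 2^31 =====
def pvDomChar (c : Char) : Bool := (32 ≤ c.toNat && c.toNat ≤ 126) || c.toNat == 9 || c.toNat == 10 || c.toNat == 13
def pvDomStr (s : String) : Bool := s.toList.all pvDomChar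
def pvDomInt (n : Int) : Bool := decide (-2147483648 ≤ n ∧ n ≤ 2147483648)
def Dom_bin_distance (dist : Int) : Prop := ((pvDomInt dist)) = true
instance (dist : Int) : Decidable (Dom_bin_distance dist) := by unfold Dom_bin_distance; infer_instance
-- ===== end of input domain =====

-- B replaces A's binary search over the fixed sorted bucket list by a single linear
-- count of the buckets strictly below dist (simpler; same value on every Int).


-- ===== PORT A =====
def pvBuckets : List Int := [-8, -4, -2, -1, 1, 2, 3, 4, 5, 8, 16, 32, 64]

-- A's while loop; low/high are Nat indices, mid = low + (high-low)/2 exactly as in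
-- Python (int((high-low)/2) with 0 ≤ high-low ≤ 13 is exact Nat division by 2);
-- buckets[mid] with mid always in range is ported as getD with an unreachable default.
def binSearchLoop (dist : Int) (low high : Nat) : Int :=
  if _h : low < high then
    let mid := low + (high - low) / 2
    if dist > pvBuckets.getD mid 0 then binSearchLoop dist (mid + 1) high
    else if dist < pvBuckets.getD mid 0 then binSearchLoop dist low mid
    else (mid : Int)
  else (low : Int)
termination_by high - low
decreasing_by all_goals omega

def bin_distance (dist : Int) : Int := binSearchLoop dist 0 pvBuckets.length

-- ===== PORT B =====
-- sum(1 for b in buckets if dist > b)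
def bin_distance_alt (dist : Int) : Int :=
  (pvBuckets.map (fun b => if dist > b then (1 : Int) else 0)).sum

-- ===== PRECONDITION & SPEC =====
def Spec_bin_distance (dist : Int) (out : Int) : Prop := out = bin_distance_alt dist
instance (dist : Int) (out : Int) : Decidable (Spec_bin_distance dist out) := by unfold Spec_bin_distance; infer_instance

-- ===== CLAIM (what is proved, stated in full; the proofs are below) =====
def Claim_equal_bin_distance : Prop := ∀ (dist : Int), Dom_bin_distance dist → Spec_bin_distance dist (bin_distance dist)

-- ===== LEMMAS AND PROOFS =====
-- Both sides equal bisect_left(buckets, dist) = the number of buckets strictly below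
-- dist: the buckets are strictly sorted, so that count characterises every comparison.
theorem pvBuckets_lt_iff (dist : Int) (j : Nat) (hj : j < pvBuckets.length) :
    pvBuckets[j] < dist ↔ j < PySem.List.bisectLeft pvBuckets dist := by
  obtain ⟨hle, hlt, hge⟩ := PySem.List.bisectLeft_spec pvBuckets dist (by decide)
  constructor
  · intro h
    by_contra hc
    exact absurd (hge j hj (by omega)) (by omega)
  · intro h
    exact hlt j hj h

-- loop invariant: while low ≤ bisectLeft ≤ high the loop returns bisectLeft
theorem loop_eq (dist : Int) (low high : Nat) (hh : high ≤ pvBuckets.length)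
    (h1 : low ≤ PySem.List.bisectLeft pvBuckets dist)
    (h2 : PySem.List.bisectLeft pvBuckets dist ≤ high) :
    binSearchLoop dist low high = (PySem.List.bisectLeft pvBuckets dist : Int) := by
  set c := PySem.List.bisectLeft pvBuckets dist with hc
  rw [binSearchLoop]
  by_cases h : low < high
  · have hmidlt : low + (high - low) / 2 < pvBuckets.length := by omega
    have hg : pvBuckets.getD (low + (high - low) / 2) 0 = pvBuckets[low + (high - low) / 2] :=
      List.getD_eq_getElem _ _ hmidlt
    have hiff := pvBuckets_lt_iff dist (low + (high - low) / 2) hmidlt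
    simp only [dif_pos h, hg]
    split_ifs with ha hb
    · exact loop_eq dist _ high hh (by omega) h2
    · exact loop_eq dist low _ (by omega) h1 (by
        rw [← hc] at hiff ⊢
        omega)
    · -- dist = buckets[mid]: mid is exactly bisectLeft
      have heq : dist = pvBuckets[low + (high - low) / 2] := by omega
      have hcle : c ≤ low + (high - low) / 2 := by rw [← hc] at hiff; omega
      have hge : low + (high - low) / 2 ≤ c := by
        by_contra hcon
        have hclen : c < pvBuckets.length := by omega
        obtain ⟨_, _, hge'⟩ := PySem.List.bisectLeft_spec pvBuckets dist (by decide)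
        have h1' : dist ≤ pvBuckets[c] := hge' c hclen (by omega)
        have h2' : pvBuckets[c] < pvBuckets[low + (high - low) / 2] := by
          have hp : List.Pairwise (· < ·) pvBuckets := by decide
          exact List.pairwise_iff_getElem.mp hp c _ hclen hmidlt (by omega)
        omega
      omega
  · simp only [dif_neg h]
    omega
termination_by high - low
decreasing_by all_goals omega

theorem bin_distance_eq_alt (dist : Int) : bin_distance dist = bin_distance_alt dist := by
  have hle := (PySem.List.bisectLeft_spec pvBuckets dist (by decide)).1
  have hA : bin_distance dist = (PySem.List.bisectLeft pvBuckets dist : Int) :=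
    loop_eq dist 0 pvBuckets.length le_rfl (Nat.zero_le _) hle
  have hB : bin_distance_alt dist = (PySem.List.bisectLeft pvBuckets dist : Int) := by
    set c := PySem.List.bisectLeft pvBuckets dist with hc
    have hiff := fun j hj => pvBuckets_lt_iff dist j hj
    have h0 := hiff 0 (by decide); have h1 := hiff 1 (by decide)
    have h2 := hiff 2 (by decide); have h3 := hiff 3 (by decide)
    have h4 := hiff 4 (by decide); have h5 := hiff 5 (by decide)
    have h6 := hiff 6 (by decide); have h7 := hiff 7 (by decide)
    have h8 := hiff 8 (by decide); have h9 := hiff 9 (by decide)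
    have h10 := hiff 10 (by decide); have h11 := hiff 11 (by decide)
    have h12 := hiff 12 (by decide)
    simp only [pvBuckets, List.getElem_cons_zero, List.getElem_cons_succ] at *
    unfold bin_distance_alt pvBuckets
    simp only [List.map, List.sum_cons, List.sum_nil]
    have hlen : c ≤ 13 := hle
    interval_cases c <;> simp_all <;> omega
  rw [hA, hB]

-- ===== VERDICT (by name: the statement is the Claim_ definition above) =====
theorem bin_distance_spec : Claim_equal_bin_distance := by
  intro dist _
  unfold Spec_bin_distance
  exact bin_distance_eq_alt dist
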